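-- pv_equiv track=rewrite | github.com/Em500gt/Homework4-py | Task5.py | sum_file
-- ===== SOURCE A (Python) =====
-- def sum_file(f_first, f_second):
--     result = {}
--     maxx = max(max(f_first), max(f_second))
--     for i in range(maxx, -1, -1):
--         f = f_first.get(i)
--         s = f_second.get(i)
--         if f != None or s != None:
--             result[i] = (f if f != None else 0) + (s if s != None else 0)
--     return result
-- ===== SOURCE B (Python) =====
-- def sum_file(f_first, f_second):
--     keys = {k for k in f_first if k >= 0} | {k for k in f_second if k >= 0}
--     return {k: f_first.get(k, 0) + f_second.get(k, 0) for k in sorted(keys, reverse=True)}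
-- ===== Notes on version B (the rewrite author's own statement) =====
-- stated objective: alternative
-- what changed: B builds the union of the keys actually present (nonnegative ones) and sorts it descending, instead of A's countdown scan over every integer from the maximum key to 0.
import Mathlib
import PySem

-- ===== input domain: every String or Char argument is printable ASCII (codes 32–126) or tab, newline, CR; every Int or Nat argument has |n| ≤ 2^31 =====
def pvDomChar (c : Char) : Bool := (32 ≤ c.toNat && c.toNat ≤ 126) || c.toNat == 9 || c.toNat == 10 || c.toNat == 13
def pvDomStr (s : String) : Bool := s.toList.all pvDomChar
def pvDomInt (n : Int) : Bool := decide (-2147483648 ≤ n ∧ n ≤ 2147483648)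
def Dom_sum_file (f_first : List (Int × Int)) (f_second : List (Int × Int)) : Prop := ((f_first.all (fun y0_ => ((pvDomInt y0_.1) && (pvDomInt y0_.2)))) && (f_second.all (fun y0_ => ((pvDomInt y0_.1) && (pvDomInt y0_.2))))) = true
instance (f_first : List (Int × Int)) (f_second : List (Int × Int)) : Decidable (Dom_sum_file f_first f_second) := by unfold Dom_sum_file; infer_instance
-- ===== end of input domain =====

-- B replaces A's countdown scan over every integer from the maximum key to 0 by a
-- descending sort of the (nonnegative) keys actually present in either dict.
-- Equivalence of the return value is proved on Pre_ (both dicts nonempty).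

-- ===== PORT A =====
def sum_file (f_first : List (Int × Int)) (f_second : List (Int × Int)) : List (Int × Int) :=
  -- maxx = max(max(f_first), max(f_second)); max() over a dict iterates its keys
  match PySem.List.max? (f_first.map Prod.fst) (fun x => x),
        PySem.List.max? (f_second.map Prod.fst) (fun x => x) with
  | some m1, some m2 =>
      let maxx := max m1 m2
      ((PySem.List.pyRange maxx (-1) (-1)).foldl (fun result i =>
          let f := (PySem.Dict.mk f_first).get? i
          let s := (PySem.Dict.mk f_second).get? i
          if f ≠ none ∨ s ≠ none then
            result.insert i (f.getD 0 + s.getD 0)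
          else result) (PySem.Dict.empty : PySem.Dict Int Int)).items
  | _, _ => []   -- unreachable under Pre_: max() raises ValueError on an empty dict

-- ===== PORT B =====
def sum_file_alt (f_first : List (Int × Int)) (f_second : List (Int × Int)) : List (Int × Int) :=
  let keys : PySem.Set Int :=
    PySem.Set.union (PySem.Set.ofList ((f_first.map Prod.fst).filter (fun k => decide (0 ≤ k))))
                    ((f_second.map Prod.fst).filter (fun k => decide (0 ≤ k)))
  ((PySem.List.sorted keys (fun x => x) true).foldl
      (fun d k => d.insert k ((PySem.Dict.mk f_first).getD k 0 + (PySem.Dict.mk f_second).getD k 0))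
      (PySem.Dict.empty : PySem.Dict Int Int)).items

-- ===== PRECONDITION & SPEC =====
-- Pre_ excludes only the inputs on which A raises: max() raises ValueError on an empty dict.
def Pre_sum_file (f_first : List (Int × Int)) (f_second : List (Int × Int)) : Prop :=
  f_first ≠ [] ∧ f_second ≠ []
instance (f_first : List (Int × Int)) (f_second : List (Int × Int)) : Decidable (Pre_sum_file f_first f_second) := by unfold Pre_sum_file; infer_instance

def pvWitness_sum_file : (List (Int × Int)) × (List (Int × Int)) := ([(0, 1), (3, 4)], [(0, 2)])

def Spec_sum_file (f_first : List (Int × Int)) (f_second : List (Int × Int)) (out : List (Int × Int)) : Prop := out = sum_file_alt f_first f_second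
instance (f_first : List (Int × Int)) (f_second : List (Int × Int)) (out : List (Int × Int)) : Decidable (Spec_sum_file f_first f_second out) := by unfold Spec_sum_file; infer_instance

-- ===== CLAIM (what is proved, stated in full; the proofs are below) =====
def Claim_equal_sum_file : Prop := ∀ (f_first : List (Int × Int)) (f_second : List (Int × Int)), Dom_sum_file f_first f_second → Pre_sum_file f_first f_second → Spec_sum_file f_first f_second (sum_file f_first f_second)

-- ===== LEMMAS AND PROOFS =====

-- A guarded insert-loop over distinct keys, all fresh for d, appends its (key, value) pairs.
lemma foldl_ite_insert_items (p : Int → Prop) [DecidablePred p] (g : Int → Int) :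
    ∀ (L : List Int) (d : PySem.Dict Int Int), L.Nodup → (∀ i ∈ L, d.contains i = false) →
      (L.foldl (fun d i => if p i then d.insert i (g i) else d) d).items
        = d.items ++ (L.filter (fun i => decide (p i))).map (fun i => (i, g i)) := by
  intro L
  induction L with
  | nil => intro d _ _; simp
  | cons x t ih =>
      intro d hnd hfresh
      simp only [List.foldl_cons, List.filter_cons]
      by_cases hp : p x
      · rw [if_pos hp, ih _ (List.Nodup.of_cons hnd)
            (by intro i hi
                rw [PySem.Dict.contains_insert]
                have : i ≠ x := fun h => (List.nodup_cons.mp hnd).1 (h ▸ hi)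
                simp [this, hfresh i (List.mem_cons_of_mem _ hi)]),
          PySem.Dict.items_insert_of_not_contains _ _ (hfresh x (List.mem_cons_self))]
        simp [hp]
      · rw [if_neg hp, ih _ (List.Nodup.of_cons hnd)
            (fun i hi => hfresh i (List.mem_cons_of_mem _ hi))]
        simp [hp]

lemma get?_mk_ne_none_iff : ∀ (l : List (Int × Int)) (x : Int),
    ((PySem.Dict.mk l).get? x ≠ none) ↔ x ∈ l.map Prod.fst := by
  intro l x
  induction l with
  | nil => simp [PySem.Dict.get?]
  | cons hd t ih =>
      obtain ⟨k, v⟩ := hd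
      rw [PySem.Dict.get?_mk_cons]
      by_cases h : k = x
      · simp [h]
      · have hb : (k == x) = false := by simp [h]
        have h' : ¬ x = k := fun hx => h hx.symm
        simp [hb, ih, h']

lemma pairwise_gt_pyRange_neg_one (a b : Int) :
    (PySem.List.pyRange a b (-1)).Pairwise (fun x y => y < x) := by
  rw [PySem.List.pyRange_neg_one_eq_reverse]
  rw [List.pairwise_reverse]
  exact PySem.List.pairwise_lt_pyRange_one _ _

lemma nodup_pyRange_neg_one (a b : Int) : (PySem.List.pyRange a b (-1)).Nodup := by
  rw [PySem.List.pyRange_neg_one_eq_reverse]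
  exact List.nodup_reverse.mpr (PySem.List.nodup_pyRange_one _ _)

theorem sum_file_spec : Claim_equal_sum_file := by
  intro f1 f2 _ hpre
  obtain ⟨h1, h2⟩ := hpre
  unfold Spec_sum_file sum_file sum_file_alt
  -- both maxes exist
  rcases hm1 : PySem.List.max? (f1.map Prod.fst) (fun x => x) with _ | m1
  · exact absurd (List.map_eq_nil_iff.mp ((PySem.List.max?_eq_none_iff _ _).mp hm1)) h1
  rcases hm2 : PySem.List.max? (f2.map Prod.fst) (fun x => x) with _ | m2
  · exact absurd (List.map_eq_nil_iff.mp ((PySem.List.max?_eq_none_iff _ _).mp hm2)) h2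
  have hmax1 := PySem.List.max?_isMax hm1
  have hmax2 := PySem.List.max?_isMax hm2
  simp only []
  set maxx := max m1 m2 with hmaxx
  set p : Int → Prop := fun i =>
    (PySem.Dict.mk f1).get? i ≠ none ∨ (PySem.Dict.mk f2).get? i ≠ none with hp
  set keys : PySem.Set Int :=
    PySem.Set.union (PySem.Set.ofList ((f1.map Prod.fst).filter (fun k => decide (0 ≤ k))))
                    ((f2.map Prod.fst).filter (fun k => decide (0 ≤ k))) with hkeys
  have hkeysnd : keys.Nodup := PySem.Set.nodup_union _ _ (PySem.Set.nodup_ofList _)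
  have hsortnd : (PySem.List.sorted keys (fun x => x) true).Nodup :=
    (PySem.List.sorted_perm keys (fun x => x) true).nodup_iff.mpr hkeysnd
  -- the descending filtered range IS sorted(keys, reverse=True)
  have hlist : PySem.List.sorted keys (fun x => x) true
      = (PySem.List.pyRange maxx (-1) (-1)).filter (fun i => decide (p i)) := by
    refine (PySem.List.sorted_rev_eq_of_perm_of_pairwise_gt keys ((PySem.List.pyRange maxx (-1) (-1)).filter (fun i => decide (p i))) (fun x : Int => x) ?_ ?_)
    · apply (List.perm_ext_iff_of_nodup ((nodup_pyRange_neg_one _ _).filter _) hkeysnd).mpr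
      intro x
      simp only [List.mem_filter, PySem.List.mem_pyRange_neg_one, hkeys,
        PySem.Set.mem_union, PySem.Set.mem_ofList, decide_eq_true_eq, hp,
        get?_mk_ne_none_iff]
      constructor
      · rintro ⟨⟨hlb, _⟩, hmem⟩
        rcases hmem with hm | hm
        · exact Or.inl ⟨hm, by omega⟩
        · exact Or.inr ⟨hm, by omega⟩
      · rintro (⟨hm, hge⟩ | ⟨hm, hge⟩)
        · exact ⟨⟨by omega, by have := hmax1 x hm; simp at this ⊢; omega⟩, Or.inl hm⟩
        · exact ⟨⟨by omega, by have := hmax2 x hm; simp at this ⊢; omega⟩, Or.inr hm⟩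
    · exact (pairwise_gt_pyRange_neg_one _ _).filter _
  rw [foldl_ite_insert_items p _ _ _ (nodup_pyRange_neg_one _ _) (by intro i _; simp),
      PySem.Dict.items_foldl_insert_fresh _ _ _ _ (by intro a _; simp) (by simpa using hsortnd),
      hlist]
  simp only [show (PySem.Dict.empty : PySem.Dict Int Int).items = [] from rfl, List.nil_append]
  apply List.map_congr_left
  intro i _
  simp [PySem.Dict.getD_eq_get?_getD]
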